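-- pv_equiv track=rewrite | github.com/DigitalHallucinations/ATLAS | modules/Tools/Base_Tools/registry_capability.py | _normalize_capability_types
-- ===== SOURCE A (Python) =====
-- from typing import Any, Mapping, MutableMapping, Optional, Sequence
--
-- _DEFAULT_CAPABILITY_TYPES = ("summary",)
--
-- _CAPABILITY_TYPE_ALIASES = {
--     "summary": "summary",
--     "summaries": "summary",
--     "tool": "tools",
--     "tools": "tools",
--     "skill": "skills",
--     "skills": "skills",
--     "task": "tasks",
--     "tasks": "tasks",
--     "job": "jobs",
--     "jobs": "jobs",
--     "all": "all",
-- }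
--
-- def _normalize_capability_types(
--     capability_types: Optional[Sequence[Any]],
-- ) -> tuple[str, ...]:
--     if not capability_types:
--         return _DEFAULT_CAPABILITY_TYPES
--
--     resolved: list[str] = []
--     for entry in capability_types:
--         if entry is None:
--             continue
--         token = str(entry).strip().lower()
--         if not token:
--             continue
--         alias = _CAPABILITY_TYPE_ALIASES.get(token)
--         if alias is None:
--             continue
--         if alias == "all":
--             for value in ("summary", "tools", "skills", "tasks", "jobs"):
--                 if value not in resolved:
--                     resolved.append(value)
--         elif alias not in resolved:
--             resolved.append(alias)
--     return tuple(resolved or _DEFAULT_CAPABILITY_TYPES)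
-- ===== SOURCE B (Python) =====
-- _DEFAULT_CAPABILITY_TYPES = ("summary",)
--
-- _CAPABILITY_TYPE_ALIASES = {
--     "summary": "summary",
--     "summaries": "summary",
--     "tool": "tools",
--     "tools": "tools",
--     "skill": "skills",
--     "skills": "skills",
--     "task": "tasks",
--     "tasks": "tasks",
--     "job": "jobs",
--     "jobs": "jobs",
--     "all": "all",
-- }
--
-- _ALL_EXPANSION = ("summary", "tools", "skills", "tasks", "jobs")
--
--
-- def _resolve(entry):
--     """Flat tuple of canonical tokens for one entry (no dedup)."""
--     if entry is None:
--         return ()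
--     alias = _CAPABILITY_TYPE_ALIASES.get(str(entry).strip().lower())
--     if alias is None:
--         return ()
--     return _ALL_EXPANSION if alias == "all" else (alias,)
--
--
-- def _normalize_capability_types(capability_types):
--     # Sort-based dedup: record the first-occurrence position of every
--     # canonical token in the flattened resolved stream, then emit the
--     # tokens sorted by that position.
--     if not capability_types:
--         return _DEFAULT_CAPABILITY_TYPES
--     flat = [tok for entry in capability_types for tok in _resolve(entry)]
--     first = {}
--     for i, tok in enumerate(flat):
--         first.setdefault(tok, i)
--     if not first:
--         return _DEFAULT_CAPABILITY_TYPES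
--     return tuple(sorted(first, key=first.__getitem__))
-- ===== Notes on version B (the rewrite author's own statement) =====
-- stated objective: alternative
-- what changed: Replaces A's single loop that maintains an ordered result list with membership-checked appends by a sort-based scheme: flatten every entry to its resolved canonical tokens, record each token's first-occurrence index in one pass with dict.setdefault, then emit the tokens sorted by that index.
import Mathlib
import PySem

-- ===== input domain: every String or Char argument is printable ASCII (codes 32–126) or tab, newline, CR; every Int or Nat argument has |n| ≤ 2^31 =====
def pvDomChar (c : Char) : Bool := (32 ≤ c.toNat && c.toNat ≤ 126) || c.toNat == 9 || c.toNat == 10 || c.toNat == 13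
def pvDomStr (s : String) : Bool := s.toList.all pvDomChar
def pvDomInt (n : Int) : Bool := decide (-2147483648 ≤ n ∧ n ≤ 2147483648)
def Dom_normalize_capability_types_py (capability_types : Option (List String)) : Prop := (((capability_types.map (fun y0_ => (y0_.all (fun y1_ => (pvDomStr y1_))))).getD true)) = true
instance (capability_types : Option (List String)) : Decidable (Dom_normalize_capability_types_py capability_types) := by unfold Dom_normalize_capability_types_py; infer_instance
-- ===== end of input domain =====

-- B replaces A's inline membership-checked ordered accumulator by a sort-based scheme: flatten to
-- a resolved token stream, record first-occurrence indices with setdefault, sort tokens by index.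

-- ===== PORT A =====
-- module constant _CAPABILITY_TYPE_ALIASES (shared by both ports)
def capAliases : PySem.Dict String String :=
  PySem.Dict.ofList [("summary","summary"),("summaries","summary"),("tool","tools"),
    ("tools","tools"),("skill","skills"),("skills","skills"),("task","tasks"),
    ("tasks","tasks"),("job","jobs"),("jobs","jobs"),("all","all")]

-- one iteration of A's loop body (the body of `for entry in capability_types`)
def aStep (resolved : List String) (entry : String) : List String :=
  let token := PySem.Str.lower (PySem.Str.strip entry)
  if token = "" then resolved
  else
    match capAliases.get? token with
    | none => resolved
    | some al =>
      if al = "all" then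
        ["summary","tools","skills","tasks","jobs"].foldl
          (fun r v => if v ∈ r then r else r ++ [v]) resolved
      else if al ∈ resolved then resolved else resolved ++ [al]

def normalize_capability_types_py (capability_types : Option (List String)) : List String :=
  match capability_types with
  | none => ["summary"]          -- `if not capability_types: return _DEFAULT_CAPABILITY_TYPES`
  | some [] => ["summary"]
  | some l =>
    let resolved := l.foldl aStep []
    if resolved = [] then ["summary"] else resolved

-- ===== PORT B =====
-- _resolve: the flat list of canonical tokens for one entry, no dedup
def pvResolve (entry : String) : List String :=
  match capAliases.get? (PySem.Str.lower (PySem.Str.strip entry)) with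
  | none => []
  | some al => if al = "all" then ["summary","tools","skills","tasks","jobs"] else [al]

-- the body of B's `for i, tok in enumerate(flat): first.setdefault(tok, i)` loop
def bStep (d : PySem.Dict String Int) (p : Int × String) : PySem.Dict String Int :=
  d.setdefault p.2 p.1

def normalize_capability_types_py_alt (capability_types : Option (List String)) : List String :=
  let l := capability_types.getD []
  if l = [] then ["summary"]          -- `if not capability_types` (None or empty list)
  else
    let flat := l.flatMap pvResolve
    -- first-occurrence index of every token: one setdefault pass over enumerate(flat)
    let first := (PySem.List.enumerate flat 0).foldl bStep PySem.Dict.empty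
    if first.items = [] then ["summary"]   -- `if not first`
    else PySem.List.sorted first.keys (fun k => first.getD k 0) false  -- sorted(first, key=first.__getitem__)

-- ===== PRECONDITION & SPEC =====
def Spec_normalize_capability_types_py (capability_types : Option (List String)) (out : List String) : Prop := out = normalize_capability_types_py_alt capability_types
instance (capability_types : Option (List String)) (out : List String) : Decidable (Spec_normalize_capability_types_py capability_types out) := by unfold Spec_normalize_capability_types_py; infer_instance

-- ===== CLAIM (what is proved, stated in full; the proofs are below) =====
def Claim_equal_normalize_capability_types_py : Prop := ∀ (capability_types : Option (List String)), Dom_normalize_capability_types_py capability_types → Spec_normalize_capability_types_py capability_types (normalize_capability_types_py capability_types)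

-- ===== LEMMAS AND PROOFS =====

-- A's inline "if v not in r: r.append(v)" is exactly PySem.Set.add
theorem addFun_eq : (fun (r : List String) (v : String) => if v ∈ r then r else r ++ [v]) = PySem.Set.add := by
  funext r v
  simp [PySem.Set.add, PySem.Set.contains]

-- one step of A's loop = folding Set.add over the tokens B flattens out of that entry
theorem aStep_eq (r : List String) (e : String) :
    aStep r e = (pvResolve e).foldl PySem.Set.add r := by
  unfold aStep pvResolve
  by_cases h : PySem.Str.lower (PySem.Str.strip e) = ""
  · rw [h]
    have hnone : capAliases.get? "" = none := by rfl
    rw [hnone]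
    rfl
  · rw [if_neg h]
    cases hg : capAliases.get? (PySem.Str.lower (PySem.Str.strip e)) with
    | none => rfl
    | some a =>
      dsimp only
      by_cases ha : a = "all"
      · rw [if_pos ha, if_pos ha, addFun_eq]
      · rw [if_neg ha, if_neg ha, List.foldl_cons, List.foldl_nil]
        exact congrFun (congrFun addFun_eq r) a

-- A's whole loop equals folding Set.add over the flattened token list
theorem aFold_eq (l : List String) (acc : List String) :
    l.foldl aStep acc = (l.flatMap pvResolve).foldl PySem.Set.add acc := by
  induction l generalizing acc with
  | nil => simp
  | cons e t ih =>
    rw [List.foldl_cons, List.flatMap_cons, List.foldl_append, ih, aStep_eq]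

-- invariant of B's setdefault loop: keys grow like a Set.update over the tokens,
-- keys stay Nodup, and the sequence of stored indices along items is strictly increasing
theorem bFold_inv (flat : List String) (s : Int) (d0 : PySem.Dict String Int)
    (hn : d0.keys.Nodup) (hb : ∀ p ∈ d0.items, p.2 < s)
    (hm : d0.items.Pairwise (fun p q => p.2 < q.2)) :
    ((PySem.List.enumerate flat s).foldl bStep d0).keys = PySem.Set.update d0.keys flat ∧
    ((PySem.List.enumerate flat s).foldl bStep d0).keys.Nodup ∧
    (∀ p ∈ ((PySem.List.enumerate flat s).foldl bStep d0).items, p.2 < s + flat.length) ∧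
    ((PySem.List.enumerate flat s).foldl bStep d0).items.Pairwise (fun p q => p.2 < q.2) := by
  induction flat generalizing s d0 with
  | nil =>
    refine ⟨?_, ?_, ?_, ?_⟩ <;>
      simp only [PySem.List.enumerate_nil, List.foldl_nil, PySem.Set.update_nil,
        List.length_nil, Nat.cast_zero, add_zero]
    exacts [hn, hb, hm]
  | cons x t ih =>
    rw [PySem.List.enumerate_cons, List.foldl_cons]
    by_cases hc : d0.contains x = true
    · have hstep : bStep d0 (s, x) = d0 := PySem.Dict.setdefault_of_contains d0 s hc
      rw [hstep]
      have hb' : ∀ p ∈ d0.items, p.2 < s + 1 := fun p hp => lt_trans (hb p hp) (by omega)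
      obtain ⟨h1, h2, h3, h4⟩ := ih (s + 1) d0 hn hb' hm
      refine ⟨?_, h2, ?_, h4⟩
      · rw [h1, PySem.Set.update_cons]
        congr 1
        rw [PySem.Set.add_of_mem]
        exact (PySem.Dict.contains_iff_mem_keys d0 x).mp hc
      · intro p hp
        have := h3 p hp
        simp only [List.length_cons] at *
        push_cast at *
        omega
    · have hcf : d0.contains x = false := by simpa using hc
      have hstep : bStep d0 (s, x) = d0.insert x s :=
        PySem.Dict.setdefault_of_not_contains d0 s hcf
      rw [hstep]
      have hitems : (d0.insert x s).items = d0.items ++ [(x, s)] :=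
        PySem.Dict.items_insert_of_not_contains d0 s hcf
      have hkeys : (d0.insert x s).keys = d0.keys ++ [x] :=
        PySem.Dict.keys_insert_of_not_contains d0 s hcf
      have hxnm : x ∉ d0.keys := by
        intro hx
        rw [(PySem.Dict.contains_iff_mem_keys d0 x).mpr hx] at hcf
        cases hcf
      have hn' : (d0.insert x s).keys.Nodup := by
        rw [hkeys]
        exact List.Nodup.append hn (List.nodup_singleton x)
          (List.disjoint_singleton.mpr hxnm)
      have hb' : ∀ p ∈ (d0.insert x s).items, p.2 < s + 1 := by
        intro p hp
        rw [hitems] at hp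
        rcases List.mem_append.mp hp with h | h
        · exact lt_trans (hb p h) (by omega)
        · simp at h; rw [h]; omega
      have hm' : (d0.insert x s).items.Pairwise (fun p q => p.2 < q.2) := by
        rw [hitems]
        refine List.pairwise_append.mpr ⟨hm, List.pairwise_singleton _ _, ?_⟩
        intro p hp q hq
        simp at hq; rw [hq]
        exact hb p hp
      obtain ⟨h1, h2, h3, h4⟩ := ih (s + 1) (d0.insert x s) hn' hb' hm'
      refine ⟨?_, h2, ?_, h4⟩
      · rw [h1, hkeys, PySem.Set.update_cons, PySem.Set.add_of_not_mem hxnm]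
      · intro p hp
        have := h3 p hp
        simp only [List.length_cons] at *
        push_cast at *
        omega

-- items empty iff keys empty
theorem items_eq_nil_iff_keys (d : PySem.Dict String Int) : d.items = [] ↔ d.keys = [] := by
  constructor
  · intro h; simp [PySem.Dict.keys, h]
  · intro h
    have : d.items.map (·.1) = [] := h
    exact List.map_eq_nil_iff.mp this

-- B's whole index-then-sort pipeline on an arbitrary flattened stream equals A's
-- (default-guarded) ordered dedup of the same stream
theorem bCore (flat : List String) :
    (if ((PySem.List.enumerate flat 0).foldl bStep PySem.Dict.empty).items = [] then ["summary"]
     else PySem.List.sorted ((PySem.List.enumerate flat 0).foldl bStep PySem.Dict.empty).keys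
       (fun k => ((PySem.List.enumerate flat 0).foldl bStep PySem.Dict.empty).getD k 0) false)
    = (if PySem.List.dedup flat = [] then ["summary"] else PySem.List.dedup flat) := by
  obtain ⟨h1, h2, _, h4⟩ := bFold_inv flat 0 PySem.Dict.empty
    (by rw [PySem.Dict.keys_empty]; exact List.nodup_nil)
    (by intro p hp; cases hp) (by constructor)
  have hkeys : ((PySem.List.enumerate flat 0).foldl bStep PySem.Dict.empty).keys
      = PySem.List.dedup flat := by
    rw [h1, PySem.Dict.keys_empty, PySem.Set.update_nil_left, ← PySem.List.dedup_eq_ofList]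
  have hitems := PySem.Dict.items_eq_map_keys _ h2 (0 : Int)
  have hpw : ((PySem.List.enumerate flat 0).foldl bStep PySem.Dict.empty).keys.Pairwise
      (fun a b => ((PySem.List.enumerate flat 0).foldl bStep PySem.Dict.empty).getD a 0
        < ((PySem.List.enumerate flat 0).foldl bStep PySem.Dict.empty).getD b 0) := by
    rw [hitems, List.pairwise_map] at h4
    exact h4
  have hsorted := PySem.List.sorted_eq_of_perm_of_pairwise_lt _ _ _ (List.Perm.refl _) hpw
  rw [hsorted, hkeys]
  by_cases hnil : PySem.List.dedup flat = []
  · rw [if_pos hnil, if_pos ((items_eq_nil_iff_keys _).mpr (hkeys.trans hnil))]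
  · rw [if_neg hnil, if_neg (fun h => hnil (hkeys.symm.trans ((items_eq_nil_iff_keys _).mp h)))]

-- ===== VERDICT (by name: the statement is the Claim_ definition above) =====
theorem normalize_capability_types_py_spec : Claim_equal_normalize_capability_types_py := by
  intro ct _
  unfold Spec_normalize_capability_types_py normalize_capability_types_py normalize_capability_types_py_alt
  match ct with
  | none => rfl
  | some [] => rfl
  | some (x :: xs) =>
    dsimp only [Option.getD_some]
    rw [if_neg (List.cons_ne_nil x xs)]
    rw [aFold_eq]
    have h := bCore ((x :: xs).flatMap pvResolve)
    rw [PySem.List.dedup_eq_ofList, PySem.Set.ofList_eq_foldl] at h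
    exact h.symm
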